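-- pv_equiv track=rewrite | github.com/sbhakim/Cybercane | api/app/pipeline/deterministic.py | _parse_dmarc_policy
-- ===== SOURCE A (Python) =====
-- def _parse_dmarc_policy(txt: str | None) -> str | None:
--     """Extract the DMARC policy (p=) directive from a DMARC TXT record."""
--     if not txt:
--         return None
--     parts = [p.strip() for p in txt.split(";")]
--     for p in parts:
--         if p.startswith("p="):
--             return p.split("=", 1)[1]
--     return None
-- ===== SOURCE B (Python) =====
-- def _parse_dmarc_policy(txt):
--     """Extract the DMARC policy (p=) directive from a DMARC TXT record."""
--     if not txt:
--         return None
--     tags = {}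
--     for part in txt.split(";"):
--         part = part.strip()
--         if "=" in part:
--             k, v = part.split("=", 1)
--             tags.setdefault(k, v)
--     return tags.get("p")
-- ===== Notes on version B (the rewrite author's own statement) =====
-- stated objective: idiomatic
-- what changed: Instead of scanning stripped parts for the first one starting with 'p=' and early-returning, B parses every ';'-separated directive into a dict in one pass (setdefault keeps the first occurrence) and then looks up 'p'.
import Mathlib
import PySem

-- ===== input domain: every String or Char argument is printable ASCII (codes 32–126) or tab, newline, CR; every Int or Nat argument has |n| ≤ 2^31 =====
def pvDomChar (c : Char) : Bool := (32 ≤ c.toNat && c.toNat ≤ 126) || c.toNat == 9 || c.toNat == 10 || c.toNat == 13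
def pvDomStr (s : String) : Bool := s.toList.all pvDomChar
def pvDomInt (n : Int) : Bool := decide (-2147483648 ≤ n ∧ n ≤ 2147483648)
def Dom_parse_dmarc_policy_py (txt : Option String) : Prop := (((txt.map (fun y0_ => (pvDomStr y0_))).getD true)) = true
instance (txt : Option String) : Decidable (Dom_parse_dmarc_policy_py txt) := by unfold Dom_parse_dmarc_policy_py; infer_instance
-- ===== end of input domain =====

-- B replaces A's first-match scan over stripped parts by parsing all directives into a
-- dict (first occurrence kept via setdefault) and a final lookup of "p" (objective: idiomatic).

-- ===== PORT A =====
-- the 'for p in parts: if p.startswith("p="): return p.split("=", 1)[1]' loop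
def pvLoopA : List String → Option String
  | [] => none
  | p :: rest =>
    if PySem.Str.startswith p "p=" then
      PySem.List.pyGet? ((PySem.Str.splitMax? p "=" 1).getD []) 1
    else pvLoopA rest

def parse_dmarc_policy_py (txt : Option String) : Option String :=
  match txt with
  | none => none
  | some t =>
    if t = "" then none
    else
      let parts := ((PySem.Str.split? t ";").getD []).map PySem.Str.strip
      pvLoopA parts

-- ===== PORT B =====
-- one iteration of B's loop: strip the part and, if it contains '=', setdefault k, v
def pvStepB (d : PySem.Dict String String) (part : String) : PySem.Dict String String :=
  let q := PySem.Str.strip part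
  if PySem.Str.isIn "=" q then
    match (PySem.Str.splitMax? q "=" 1).getD [] with
    | k :: v :: _ => d.setdefault k v
    | _ => d
  else d

def parse_dmarc_policy_py_alt (txt : Option String) : Option String :=
  match txt with
  | none => none
  | some t =>
    if t = "" then none
    else ((((PySem.Str.split? t ";").getD []).foldl pvStepB PySem.Dict.empty).get? "p")

-- ===== PRECONDITION & SPEC =====
def Spec_parse_dmarc_policy_py (txt : Option String) (out : Option String) : Prop := out = parse_dmarc_policy_py_alt txt
instance (txt : Option String) (out : Option String) : Decidable (Spec_parse_dmarc_policy_py txt out) := by unfold Spec_parse_dmarc_policy_py; infer_instance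

-- ===== CLAIM (what is proved, stated in full; the proofs are below) =====
def Claim_equal_parse_dmarc_policy_py : Prop := ∀ (txt : Option String), Dom_parse_dmarc_policy_py txt → Spec_parse_dmarc_policy_py txt (parse_dmarc_policy_py txt)

-- ===== LEMMAS AND PROOFS =====

-- the trigger value one stripped part contributes in A's scan
def pvTrig (p : String) : Option String :=
  if PySem.Str.startswith p "p=" then
    PySem.List.pyGet? ((PySem.Str.splitMax? p "=" 1).getD []) 1
  else none

theorem pv_go_zero (fuel : Nat) (l cur : List Char) (acc : List (List Char)) :
    PySem.Chars.splitOnMax.go ['='] fuel 0 l cur acc = ((cur.reverse ++ l) :: acc).reverse := by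
  rw [PySem.Chars.splitOnMax.go.eq_def]
  cases fuel <;> cases l <;> simp

theorem pv_go_one (l : List Char) : ∀ (fuel : Nat) (cur : List Char) (acc : List (List Char)),
    l.length < fuel →
    PySem.Chars.splitOnMax.go ['='] fuel 1 l cur acc =
      (if '=' ∈ l then
        acc.reverse ++ [cur.reverse ++ l.takeWhile (· ≠ '='),
                        l.drop ((l.takeWhile (· ≠ '=')).length + 1)]
      else acc.reverse ++ [cur.reverse ++ l]) := by
  induction l with
  | nil =>
    intro fuel cur acc h
    match fuel, h with
    | fuel+1, _ => rw [PySem.Chars.splitOnMax.go.eq_def]; simp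
  | cons c rest ih =>
    intro fuel cur acc h
    match fuel, h with
    | fuel+1, h =>
      rw [PySem.Chars.splitOnMax.go.eq_def]
      by_cases hc : c = '='
      · subst hc
        simp [List.isPrefixOf, pv_go_zero]
      · have hpre : (['='] : List Char).isPrefixOf (c :: rest) = false := by
          simp [List.isPrefixOf]; exact fun hx => absurd hx.symm hc
        simp only [hpre, Bool.false_eq_true, if_false,
          if_neg (show ¬ ((1:Nat) = 0) by omega)]
        rw [ih fuel (c :: cur) acc (by simpa using Nat.lt_of_succ_lt_succ h)]
        by_cases hm : '=' ∈ rest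
        · have h2 : '=' ∈ c :: rest := List.mem_cons_of_mem _ hm
          simp [hm, h2, hc]
        · have h2 : ¬ '=' ∈ c :: rest := by
            simp [hm]; exact fun hx => absurd hx.symm hc
          simp [hm, h2]

theorem pv_splitOnMax_mem (q : List Char) (h : '=' ∈ q) :
    PySem.Chars.splitOnMax q ['='] 1 =
      [q.takeWhile (· ≠ '='), q.drop ((q.takeWhile (· ≠ '=')).length + 1)] := by
  unfold PySem.Chars.splitOnMax
  rw [if_neg (by omega), show Int.toNat 1 = 1 from rfl,
    pv_go_one q (q.length + 1) [] [] (by omega)]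
  simp [h]

theorem pv_splitMax_str (q : String) :
    PySem.Str.splitMax? q "=" 1 =
      some ((PySem.Chars.splitOnMax q.toList ['='] 1).map String.ofList) := by
  show Option.map _ (PySem.Chars.splitMax? q.toList "=".toList 1) = _
  unfold PySem.Chars.splitMax?
  simp [show "=".toList = ['='] from rfl]

-- '=' ∈ q ↔ "=" in q
theorem pv_isIn_mem (q : String) :
    PySem.Str.isIn "=" q = true ↔ '=' ∈ q.toList := by
  rw [PySem.Str.isIn_eq, PySem.Chars.isIn_iff_infix]
  constructor
  · intro h; exact h.sublist.subset (by simp [show "=".toList = ['='] from rfl])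
  · intro h
    obtain ⟨s, t, hst⟩ := List.append_of_mem h
    exact ⟨s, t, by rw [hst, show "=".toList = ['='] from rfl]; simp⟩

-- startswith "p=" over chars describes exactly the parts whose key is "p"
theorem pv_startswith_chars (l : List Char) (h : '=' ∈ l) :
    (['p', '='] : List Char).isPrefixOf l = true ↔ l.takeWhile (· ≠ '=') = ['p'] := by
  rw [List.isPrefixOf_iff_prefix]
  constructor
  · rintro ⟨r, hr⟩
    rw [← hr]
    simp
  · intro htw
    obtain ⟨c, q', rfl⟩ : ∃ c q', l = c :: q' := by
      cases l with
      | nil => simp at htw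
      | cons a b => exact ⟨a, b, rfl⟩
    rw [List.takeWhile_cons] at htw
    by_cases hc : c = '='
    · subst hc; simp at htw
    · simp only [decide_not] at htw
      rw [if_pos (by simp [hc])] at htw
      obtain ⟨hcp, htw'⟩ := List.cons_eq_cons.mp htw
      subst hcp
      have hq' : '=' ∈ q' := by
        rcases List.mem_cons.mp h with h1 | h1
        · exact absurd h1.symm hc
        · exact h1
      cases q' with
      | nil => simp at hq'
      | cons a b =>
        by_cases ha : a = '='
        · exact ⟨b, by rw [ha]; rfl⟩
        · rw [List.takeWhile_cons] at htw'
          simp [ha] at htw'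

theorem pv_startswith_iff (q : String) (h : '=' ∈ q.toList) :
    PySem.Str.startswith q "p=" = true ↔ q.toList.takeWhile (· ≠ '=') = ['p'] := by
  rw [PySem.Str.startswith_eq]
  exact pv_startswith_chars q.toList h

theorem pv_or_some (o : Option String) (v : String) :
    Option.or o (some v) = some (o.getD v) := by cases o <;> rfl

-- one loop iteration of B, seen through .get? "p"
theorem pv_step_get (d : PySem.Dict String String) (x : String) :
    (pvStepB d x).get? "p" = Option.or (d.get? "p") (pvTrig (PySem.Str.strip x)) := by
  unfold pvStepB pvTrig
  set q := PySem.Str.strip x with hq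
  by_cases hin : PySem.Str.isIn "=" q = true
  · have hm : '=' ∈ q.toList := (pv_isIn_mem q).mp hin
    rw [if_pos hin, pv_splitMax_str]
    rw [pv_splitOnMax_mem q.toList hm]
    simp only [List.map_cons, List.map_nil, Option.getD_some]
    by_cases hsw : PySem.Str.startswith q "p=" = true
    · have htw := (pv_startswith_iff q hm).mp hsw
      rw [if_pos hsw, htw]
      rw [show String.ofList ['p'] = "p" from rfl]
      rw [PySem.Dict.get?_setdefault_self]
      rw [show PySem.List.pyGet? [("p" : String),
            String.ofList (q.toList.drop ((['p'] : List Char).length + 1))] 1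
          = some (String.ofList (q.toList.drop ((['p'] : List Char).length + 1))) by
        simp [PySem.List.pyGet?, PySem.List.pyIdx?]]
      exact (pv_or_some _ _).symm
    · have htw : q.toList.takeWhile (· ≠ '=') ≠ ['p'] := fun hcon =>
        hsw ((pv_startswith_iff q hm).mpr hcon)
      have hk : String.ofList (q.toList.takeWhile (· ≠ '=')) ≠ "p" := by
        intro hcon
        apply htw
        have := congrArg String.toList hcon
        simpa using this
      rw [if_neg hsw, PySem.Dict.get?_setdefault_of_ne d _ (Ne.symm hk), Option.or_none]
  · have hm : ¬ '=' ∈ q.toList := fun hcon => hin ((pv_isIn_mem q).mpr hcon)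
    have hsw : ¬ PySem.Str.startswith q "p=" = true := by
      intro hcon
      rw [PySem.Str.startswith_eq] at hcon
      unfold PySem.Chars.startswith at hcon
      rw [List.isPrefixOf_iff_prefix] at hcon
      exact hm (hcon.sublist.subset (by rw [show ("p=".toList) = ['p', '='] from rfl]; simp))
    rw [if_neg hin, if_neg hsw, Option.or_none]

theorem pv_loopA_cons (p : String) (l : List String) :
    pvLoopA (p :: l) = Option.or (pvTrig p) (pvLoopA l) := by
  have hdef : pvLoopA (p :: l) =
      (if PySem.Str.startswith p "p=" then
        PySem.List.pyGet? ((PySem.Str.splitMax? p "=" 1).getD []) 1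
      else pvLoopA l) := rfl
  rw [hdef]
  unfold pvTrig
  by_cases hsw : PySem.Str.startswith p "p=" = true
  · rw [if_pos hsw, if_pos hsw]
    have hm : '=' ∈ p.toList := by
      rw [PySem.Str.startswith_eq] at hsw
      unfold PySem.Chars.startswith at hsw
      rw [List.isPrefixOf_iff_prefix] at hsw
      exact hsw.sublist.subset (by rw [show ("p=".toList) = ['p', '='] from rfl]; simp)
    rw [pv_splitMax_str, pv_splitOnMax_mem p.toList hm]
    simp [PySem.List.pyGet?, PySem.List.pyIdx?, Option.or]
  · rw [if_neg hsw, if_neg hsw, Option.none_or]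

theorem pv_fold_get (xs : List String) : ∀ (d : PySem.Dict String String),
    (xs.foldl pvStepB d).get? "p" =
      Option.or (d.get? "p") (pvLoopA (xs.map PySem.Str.strip)) := by
  induction xs with
  | nil => intro d; simp [pvLoopA, Option.or_none]
  | cons x rest ih =>
    intro d
    simp only [List.foldl_cons, List.map_cons]
    rw [ih (pvStepB d x), pv_step_get, pv_loopA_cons, Option.or_assoc]

-- ===== VERDICT (by name: the statement is the Claim_ definition above) =====
theorem parse_dmarc_policy_py_spec : Claim_equal_parse_dmarc_policy_py := by
  intro txt _
  unfold Spec_parse_dmarc_policy_py parse_dmarc_policy_py parse_dmarc_policy_py_alt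
  cases txt with
  | none => rfl
  | some t =>
    by_cases ht : t = ""
    · simp [ht]
    · simp only [if_neg ht]
      rw [pv_fold_get, PySem.Dict.get?_empty, Option.none_or]
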